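-- pv_equiv track=rewrite | github.com/SubChord/lawn-mower-robot-sim | scripts/slice_sheets.py | find_bands
-- ===== SOURCE A (Python) =====
-- def find_bands(sig, min_gap, min_band, min_content):
--     n = len(sig)
--     bands = []
--     i = 0
--     while i < n:
--         if sig[i] < min_content:
--             i += 1
--             continue
--         start = i
--         gap_run = 0
--         end = i
--         while i < n:
--             if sig[i] >= min_content:
--                 end = i
--                 gap_run = 0
--             else:
--                 gap_run += 1
--                 if gap_run >= min_gap:
--                     break
--             i += 1
--         if end - start + 1 >= min_band:
--             bands.append((start, end + 1))
--     return bands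
-- ===== SOURCE B (Python) =====
-- def find_bands(sig, min_gap, min_band, min_content):
--     # Two phases: extract content indices, then group them by gap threshold.
--     idxs = [i for i, v in enumerate(sig) if v >= min_content]
--     if not idxs:
--         return []
--     g = max(min_gap, 1)
--     bands = []
--     start = prev = idxs[0]
--     for idx in idxs[1:]:
--         if idx - prev - 1 >= g:
--             if prev - start + 1 >= min_band:
--                 bands.append((start, prev + 1))
--             start = idx
--         prev = idx
--     if prev - start + 1 >= min_band:
--         bands.append((start, prev + 1))
--     return bands
-- ===== Notes on version B (the rewrite author's own statement) =====
-- stated objective: simpler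
-- what changed: A's interleaved two-level while loop with an in-band gap-run counter is replaced by two separate phases: extract the list of content indices, then a single grouping pass over that list that splits whenever the index gap reaches max(min_gap,1) and flushes bands meeting min_band.
import Mathlib
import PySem

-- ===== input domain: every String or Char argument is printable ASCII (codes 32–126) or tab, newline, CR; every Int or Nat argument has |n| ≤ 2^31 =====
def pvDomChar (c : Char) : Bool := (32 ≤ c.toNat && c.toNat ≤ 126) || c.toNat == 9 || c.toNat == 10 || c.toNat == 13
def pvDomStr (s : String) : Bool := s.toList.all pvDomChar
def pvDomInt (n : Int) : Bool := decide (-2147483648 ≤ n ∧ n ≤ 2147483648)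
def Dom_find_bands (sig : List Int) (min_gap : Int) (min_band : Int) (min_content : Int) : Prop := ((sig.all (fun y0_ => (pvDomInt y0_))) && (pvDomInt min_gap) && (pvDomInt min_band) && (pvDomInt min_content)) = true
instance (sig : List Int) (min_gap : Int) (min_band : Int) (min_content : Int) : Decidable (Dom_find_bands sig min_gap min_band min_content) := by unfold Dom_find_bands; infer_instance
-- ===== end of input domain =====

-- B replaces A's interleaved two-level while loop (inner gap-run counter) by two phases:
-- extract the content indices, then group them with a gap-threshold pass (objective: simpler decomposition).

-- ===== PORT A =====
-- inner while loop of A: state (i, end, gap_run); returns (i at exit, end).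
-- The fuel argument only makes the recursion structural; it starts at sig.length + 1
-- and (as the proofs below establish) is never exhausted.
def pvInnerA (sig : List Int) (min_content min_gap : Int) : Nat → Nat → Nat → Int → Nat × Nat
  | 0, i, e, _ => (i, e)
  | fuel + 1, i, e, gap_run =>
    if i < sig.length then
      if min_content ≤ sig.getD i 0 then
        pvInnerA sig min_content min_gap fuel (i + 1) i 0
      else if gap_run + 1 ≥ min_gap then (i, e)
      else pvInnerA sig min_content min_gap fuel (i + 1) e (gap_run + 1)
    else (i, e)

-- outer while loop of A (same fuel discipline)
def pvOuterA (sig : List Int) (min_gap min_band min_content : Int) : Nat → Nat → List (Int × Int) → List (Int × Int)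
  | 0, _, bands => bands
  | fuel + 1, i, bands =>
    if i < sig.length then
      if sig.getD i 0 < min_content then
        pvOuterA sig min_gap min_band min_content fuel (i + 1) bands
      else
        pvOuterA sig min_gap min_band min_content fuel
          (pvInnerA sig min_content min_gap (sig.length + 1) i i 0).1
          (bands ++
            (if ((pvInnerA sig min_content min_gap (sig.length + 1) i i 0).2 : Int) - (i : Int) + 1 ≥ min_band then
              [((i : Int), ((pvInnerA sig min_content min_gap (sig.length + 1) i i 0).2 : Int) + 1)]
            else []))
    else bands

def find_bands (sig : List Int) (min_gap : Int) (min_band : Int) (min_content : Int) : List (Int × Int) :=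
  pvOuterA sig min_gap min_band min_content (sig.length + 1) 0 []

-- ===== PORT B =====
-- grouping pass over the content-index list, state (bands, start, prev), final flush
def pvGroupB (g mb : Int) : List Int → List (Int × Int) → Int → Int → List (Int × Int)
  | [], bands, start, prev =>
      bands ++ (if prev - start + 1 ≥ mb then [(start, prev + 1)] else [])
  | idx :: rest, bands, start, prev =>
      if idx - prev - 1 ≥ g then
        pvGroupB g mb rest (bands ++ (if prev - start + 1 ≥ mb then [(start, prev + 1)] else [])) idx idx
      else pvGroupB g mb rest bands start idx

def find_bands_alt (sig : List Int) (min_gap : Int) (min_band : Int) (min_content : Int) : List (Int × Int) :=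
  match ((PySem.List.enumerate sig).filter (fun p => decide (p.2 ≥ min_content))).map (fun p => p.1) with
  | [] => []
  | i0 :: rest => pvGroupB (max min_gap 1) min_band rest [] i0 i0

-- ===== PRECONDITION & SPEC =====
def Spec_find_bands (sig : List Int) (min_gap : Int) (min_band : Int) (min_content : Int) (out : List (Int × Int)) : Prop := out = find_bands_alt sig min_gap min_band min_content
instance (sig : List Int) (min_gap : Int) (min_band : Int) (min_content : Int) (out : List (Int × Int)) : Decidable (Spec_find_bands sig min_gap min_band min_content out) := by unfold Spec_find_bands; infer_instance

-- ===== CLAIM (what is proved, stated in full; the proofs are below) =====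
def Claim_equal_find_bands : Prop := ∀ (sig : List Int) (min_gap : Int) (min_band : Int) (min_content : Int), Dom_find_bands sig min_gap min_band min_content → Spec_find_bands sig min_gap min_band min_content (find_bands sig min_gap min_band min_content)

-- ===== LEMMAS AND PROOFS =====

-- the list of content indices of sig at positions ≥ i
def pvIdxsFrom (sig : List Int) (mc : Int) (i : Nat) : List Int :=
  if h : i < sig.length then
    (if mc ≤ sig.getD i 0 then [((i : Nat) : Int)] else []) ++ pvIdxsFrom sig mc (i + 1)
  else []
termination_by sig.length - i
decreasing_by omega

-- the band A flushes after the inner loop / B flushes on a split, as a function of (start, end)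
def pvF (mb start : Int) (e : Nat) : List (Int × Int) :=
  if (e : Int) - start + 1 ≥ mb then [(start, (e : Int) + 1)] else []

def pvMatchB (g mb : Int) (idxs : List Int) (bands : List (Int × Int)) : List (Int × Int) :=
  match idxs with
  | [] => bands
  | q :: rest => pvGroupB g mb rest bands q q

theorem pvInnerA_stop (sig : List Int) (mc mg : Int) (f i e : Nat) (g : Int) (h : ¬ i < sig.length) :
    pvInnerA sig mc mg (f + 1) i e g = (i, e) := by
  simp only [pvInnerA, if_neg h]

theorem pvInnerA_content (sig : List Int) (mc mg : Int) (f i e : Nat) (g : Int)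
    (h : i < sig.length) (hc : mc ≤ sig.getD i 0) :
    pvInnerA sig mc mg (f + 1) i e g = pvInnerA sig mc mg f (i + 1) i 0 := by
  simp only [pvInnerA, if_pos h, if_pos hc]

theorem pvInnerA_break (sig : List Int) (mc mg : Int) (f i e : Nat) (g : Int)
    (h : i < sig.length) (hc : ¬ mc ≤ sig.getD i 0) (hg : g + 1 ≥ mg) :
    pvInnerA sig mc mg (f + 1) i e g = (i, e) := by
  simp only [pvInnerA, if_pos h, if_neg hc, if_pos hg]

theorem pvInnerA_gap (sig : List Int) (mc mg : Int) (f i e : Nat) (g : Int)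
    (h : i < sig.length) (hc : ¬ mc ≤ sig.getD i 0) (hg : ¬ g + 1 ≥ mg) :
    pvInnerA sig mc mg (f + 1) i e g = pvInnerA sig mc mg f (i + 1) e (g + 1) := by
  simp only [pvInnerA, if_pos h, if_neg hc, if_neg hg]

theorem pvOuterA_zero (sig : List Int) (mg mb mc : Int) (i : Nat) (bands : List (Int × Int)) :
    pvOuterA sig mg mb mc 0 i bands = bands := rfl

theorem pvOuterA_stop (sig : List Int) (mg mb mc : Int) (f i : Nat) (bands : List (Int × Int))
    (h : ¬ i < sig.length) : pvOuterA sig mg mb mc (f + 1) i bands = bands := by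
  simp only [pvOuterA, if_neg h]

theorem pvOuterA_skip (sig : List Int) (mg mb mc : Int) (f i : Nat) (bands : List (Int × Int))
    (h : i < sig.length) (hc : sig.getD i 0 < mc) :
    pvOuterA sig mg mb mc (f + 1) i bands = pvOuterA sig mg mb mc f (i + 1) bands := by
  simp only [pvOuterA, if_pos h, if_pos hc]

theorem pvOuterA_band (sig : List Int) (mg mb mc : Int) (f i : Nat) (bands : List (Int × Int))
    (h : i < sig.length) (hc : ¬ sig.getD i 0 < mc) :
    pvOuterA sig mg mb mc (f + 1) i bands =
      pvOuterA sig mg mb mc f (pvInnerA sig mc mg (sig.length + 1) i i 0).1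
        (bands ++ pvF mb (i : Int) (pvInnerA sig mc mg (sig.length + 1) i i 0).2) := by
  simp only [pvOuterA, if_pos h, if_neg hc]
  rfl

theorem pvIdxsFrom_stop (sig : List Int) (mc : Int) (i : Nat) (h : ¬ i < sig.length) :
    pvIdxsFrom sig mc i = [] := by rw [pvIdxsFrom, dif_neg h]

theorem pvIdxsFrom_content (sig : List Int) (mc : Int) (i : Nat)
    (h : i < sig.length) (hc : mc ≤ sig.getD i 0) :
    pvIdxsFrom sig mc i = ((i : Nat) : Int) :: pvIdxsFrom sig mc (i + 1) := by
  rw [pvIdxsFrom, dif_pos h, if_pos hc]; rfl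

theorem pvIdxsFrom_skip (sig : List Int) (mc : Int) (i : Nat)
    (h : i < sig.length) (hc : ¬ mc ≤ sig.getD i 0) :
    pvIdxsFrom sig mc i = pvIdxsFrom sig mc (i + 1) := by
  rw [pvIdxsFrom, dif_pos h, if_neg hc]; rfl

theorem pvIdxsFrom_head_ge (sig : List Int) (mc : Int) :
    ∀ (n i : Nat), sig.length - i ≤ n → ∀ (q : Int) (rest : List Int),
      pvIdxsFrom sig mc i = q :: rest → (i : Int) ≤ q := by
  intro n
  induction n with
  | zero =>
    intro i hi q rest hq
    rw [pvIdxsFrom_stop sig mc i (by omega)] at hq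
    exact absurd hq (by simp)
  | succ n ih =>
    intro i hi q rest hq
    by_cases h : i < sig.length
    · by_cases hc : mc ≤ sig.getD i 0
      · rw [pvIdxsFrom_content sig mc i h hc] at hq
        simp at hq
        omega
      · rw [pvIdxsFrom_skip sig mc i h hc] at hq
        have := ih (i + 1) (by omega) q rest hq
        push_cast at this ⊢
        omega
    · rw [pvIdxsFrom_stop sig mc i h] at hq
      exact absurd hq (by simp)

-- main invariant, by strong induction on the outer fuel fo: (1) A's outer loop from i equals
-- B's grouping pass over the content indices ≥ i, and (2) A's inner loop with state
-- (end = e, gap_run = i - e - 1) followed by the flush and the outer loop equals B's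
-- grouping pass with (start, prev = e)
theorem pvMain (sig : List Int) (mg mb mc : Int) :
    ∀ (fo : Nat),
      (∀ (i : Nat) (bands : List (Int × Int)), sig.length ≤ i + fo →
        pvOuterA sig mg mb mc fo i bands = pvMatchB (max mg 1) mb (pvIdxsFrom sig mc i) bands) ∧
      (∀ (fi i e : Nat) (start : Int) (bands : List (Int × Int)),
        sig.length < i + fi → sig.length ≤ i + fo → e < i → (i : Int) - (e : Int) - 1 < max mg 1 →
        pvOuterA sig mg mb mc fo (pvInnerA sig mc mg fi i e ((i : Int) - (e : Int) - 1)).1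
          (bands ++ pvF mb start (pvInnerA sig mc mg fi i e ((i : Int) - (e : Int) - 1)).2)
        = pvGroupB (max mg 1) mb (pvIdxsFrom sig mc i) bands start (e : Int)) := by
  intro fo
  induction fo using Nat.strong_induction_on with
  | _ fo ihS =>
    have hL : ∀ (i : Nat) (bands : List (Int × Int)), sig.length ≤ i + fo →
        pvOuterA sig mg mb mc fo i bands = pvMatchB (max mg 1) mb (pvIdxsFrom sig mc i) bands := by
      intro i bands hfo
      match fo with
      | 0 =>
        rw [pvOuterA_zero, pvIdxsFrom_stop sig mc i (by omega)]
        rfl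
      | f + 1 =>
        by_cases h : i < sig.length
        · by_cases hc : sig.getD i 0 < mc
          · rw [pvOuterA_skip sig mg mb mc f i bands h hc,
                pvIdxsFrom_skip sig mc i h (not_le.2 hc)]
            exact (ihS f (by omega)).1 (i + 1) bands (by omega)
          · have hcc : mc ≤ sig.getD i 0 := not_lt.1 hc
            have e0 : ((i + 1 : Nat) : Int) - ((i : Nat) : Int) - 1 = 0 := by push_cast; ring
            rw [pvOuterA_band sig mg mb mc f i bands h hc,
                pvInnerA_content sig mc mg sig.length i i 0 h hcc, ← e0]
            rw [(ihS f (by omega)).2 sig.length (i + 1) i (i : Int) bands (by omega) (by omega)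
                  (by omega) (by rw [e0]; exact lt_of_lt_of_le one_pos (le_max_right mg 1))]
            rw [pvIdxsFrom_content sig mc i h hcc]
            rfl
        · rw [pvOuterA_stop sig mg mb mc f i bands h, pvIdxsFrom_stop sig mc i h]
          rfl
    refine ⟨hL, ?_⟩
    intro fi
    induction fi with
    | zero =>
      intro i e start bands hfi hfo he hH
      have hni : ¬ i < sig.length := by omega
      show pvOuterA sig mg mb mc fo i (bands ++ pvF mb start e)
        = pvGroupB (max mg 1) mb (pvIdxsFrom sig mc i) bands start (e : Int)
      rw [hL i (bands ++ pvF mb start e) hfo, pvIdxsFrom_stop sig mc i hni]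
      rfl
    | succ fi ihI =>
      intro i e start bands hfi hfo he hH
      have hei : (e : Int) < (i : Int) := by exact_mod_cast he
      by_cases h : i < sig.length
      · by_cases hc : mc ≤ sig.getD i 0
        · -- content position: reset end and gap_run
          have e0 : ((i + 1 : Nat) : Int) - ((i : Nat) : Int) - 1 = 0 := by push_cast; ring
          rw [pvInnerA_content sig mc mg fi i e _ h hc, ← e0]
          rw [ihI (i + 1) i start bands (by omega) (by omega) (by omega)
              (by rw [e0]; exact lt_of_lt_of_le one_pos (le_max_right mg 1))]
          rw [pvIdxsFrom_content sig mc i h hc, pvGroupB, if_neg (not_le.2 hH)]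
        · by_cases hb : ((i : Int) - (e : Int) - 1) + 1 ≥ mg
          · -- gap run reaches min_gap: A breaks, flushes, and rescans from i
            rw [pvInnerA_break sig mc mg fi i e _ h hc hb]
            rw [hL i (bands ++ pvF mb start e) hfo]
            rw [pvIdxsFrom_skip sig mc i h hc]
            cases hq : pvIdxsFrom sig mc (i + 1) with
            | nil => simp [pvMatchB, pvGroupB, pvF]
            | cons q rest =>
              have hq1 : ((i + 1 : Nat) : Int) ≤ q :=
                pvIdxsFrom_head_ge sig mc (sig.length - (i + 1)) (i + 1) (le_refl _) q rest hq
              push_cast at hq1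
              rw [pvGroupB, if_pos (ge_iff_le.2 (max_le (by omega) (by omega)))]
              simp [pvMatchB, pvF]
          · -- gap run continues
            rw [pvInnerA_gap sig mc mg fi i e _ h hc hb]
            have e1 : ((i : Int) - (e : Int) - 1) + 1 = ((i + 1 : Nat) : Int) - (e : Nat) - 1 := by
              push_cast; ring
            rw [e1]
            rw [ihI (i + 1) e start bands (by omega) (by omega) (by omega)
                (by push_cast; exact lt_of_lt_of_le (by omega) (le_max_left mg 1))]
            rw [pvIdxsFrom_skip sig mc i h hc]
      · rw [pvInnerA_stop sig mc mg fi i e _ h]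
        rw [hL i (bands ++ pvF mb start e) hfo, pvIdxsFrom_stop sig mc i h]
        rfl

theorem pvContentIdxs_eq (sig : List Int) (mc : Int) :
    ∀ (n i : Nat), sig.length - i ≤ n →
      ((PySem.List.enumerate (sig.drop i) ((i : Nat) : Int)).filter
          (fun p => decide (p.2 ≥ mc))).map (fun p => p.1)
        = pvIdxsFrom sig mc i := by
  intro n
  induction n with
  | zero =>
    intro i hi
    rw [List.drop_eq_nil_of_le (by omega), pvIdxsFrom_stop sig mc i (by omega)]
    rfl
  | succ n ih =>
    intro i hi
    by_cases h : i < sig.length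
    · rw [List.drop_eq_getElem_cons h, PySem.List.enumerate_cons]
      have hg : sig.getD i 0 = sig[i] := List.getD_eq_getElem sig 0 h
      have e1 : ((i : Nat) : Int) + 1 = ((i + 1 : Nat) : Int) := by push_cast; ring
      by_cases hc : mc ≤ sig.getD i 0
      · rw [pvIdxsFrom_content sig mc i h hc]
        simp only [List.filter_cons]
        rw [if_pos (by rw [hg] at hc; simpa using hc)]
        simp only [List.map_cons]
        rw [e1, ih (i + 1) (by omega)]
      · rw [pvIdxsFrom_skip sig mc i h hc]
        simp only [List.filter_cons]
        rw [if_neg (by rw [hg] at hc; simpa using hc)]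
        rw [e1, ih (i + 1) (by omega)]
    · rw [List.drop_eq_nil_of_le (by omega), pvIdxsFrom_stop sig mc i h]
      rfl

-- ===== VERDICT (by name: the statement is the Claim_ definition above) =====
theorem find_bands_spec : Claim_equal_find_bands := by
  intro sig mg mb mc _
  unfold Spec_find_bands find_bands find_bands_alt
  have hC : ((PySem.List.enumerate sig).filter (fun p => decide (p.2 ≥ mc))).map (fun p => p.1)
      = pvIdxsFrom sig mc 0 := by
    have := pvContentIdxs_eq sig mc sig.length 0 (by omega)
    simpa using this
  rw [hC, (pvMain sig mg mb mc (sig.length + 1)).1 0 [] (by omega)]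
  cases pvIdxsFrom sig mc 0 <;> rfl
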